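-- pv_equiv track=rewrite | github.com/holbizmetrics/prime-alphabet-finder | dimensional_analysis.py | to_factorial_base
-- ===== SOURCE A (Python) =====
-- def to_factorial_base(n: int) -> str:
--     """Convert to factorial number system."""
--     if n == 0: return '0'
--     result = []
--     i = 2
--     while n > 0:
--         result.append(str(n % i))
--         n //= i
--         i += 1
--     return ''.join(reversed(result))
-- ===== SOURCE B (Python) =====
-- def to_factorial_base(n: int) -> str:
--     """Convert to factorial number system, most-significant digit first."""
--     if n == 0:
--         return '0'
--     # place values 1!, 2!, ..., the largest factorial <= n
--     places = []
--     f, k = 1, 1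
--     while f <= n:
--         places.append(f)
--         k += 1
--         f *= k
--     out = []
--     for p in reversed(places):
--         out.append(str(n // p))
--         n %= p
--     return ''.join(out)
-- ===== Notes on version B (the rewrite author's own statement) =====
-- stated objective: alternative
-- what changed: B builds the representation most-significant-digit first: it first computes the list of factorial place values up to the largest factorial <= n, then emits str(n // place), n %= place from the top place down, so no reversal of the digit list is needed; A peels least-significant digits with n % i, n //= i and reverses at the end.
import Mathlib
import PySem

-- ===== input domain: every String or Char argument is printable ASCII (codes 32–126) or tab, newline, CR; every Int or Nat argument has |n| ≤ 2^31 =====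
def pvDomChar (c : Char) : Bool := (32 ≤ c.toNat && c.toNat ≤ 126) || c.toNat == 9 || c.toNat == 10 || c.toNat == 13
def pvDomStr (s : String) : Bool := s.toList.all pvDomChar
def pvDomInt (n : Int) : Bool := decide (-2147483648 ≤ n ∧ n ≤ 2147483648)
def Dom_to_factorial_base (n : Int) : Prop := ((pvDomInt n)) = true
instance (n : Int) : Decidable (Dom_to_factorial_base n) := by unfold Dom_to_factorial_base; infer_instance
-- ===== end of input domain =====

-- B re-implements the conversion most-significant-digit first (place values computed up
-- front, digits emitted top-down, no final reversal); same value as A on every int.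

-- ===== PORT A =====
-- A's while loop: the divisor i starts at 2 and increases by 1 each pass; we carry
-- j with i = j + 2 (a Nat, so the i ≥ 2 invariant is structural for termination).
def toFactAux (n : Int) (j : Nat) : List String :=
  if h : 0 < n then
    PySem.Int.toStr (PySem.Int.mod n ((j : Int) + 2)) ::
      toFactAux (PySem.Int.floordiv n ((j : Int) + 2)) (j + 1)
  else []
termination_by n.toNat
decreasing_by
  have h2 : (0:Int) < (j : Int) + 2 := by positivity
  rw [PySem.Int.floordiv_eq_ediv_of_pos h2]
  have hlt : n / ((j : Int) + 2) < n := by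
    rw [Int.ediv_lt_iff_lt_mul (by positivity)]; nlinarith
  have _hnn : 0 ≤ n / ((j : Int) + 2) := Int.ediv_nonneg (le_of_lt h) (le_of_lt h2)
  omega

def to_factorial_base (n : Int) : String :=
  if n == 0 then "0" else PySem.Str.join "" (toFactAux n 0).reverse

-- ===== PORT B =====
-- B's first loop: collect the place values 1!, 2!, … while they stay ≤ n.
-- f is k! as a Nat; k = j + 1 so the multiplier k+1 is j + 2 (0 < f is an invariant
-- of B's loop, stated in the guard only to make the recursion well-founded).
def altPlaces (n : Int) (f : Nat) (j : Nat) : List Int :=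
  if h : 0 < f ∧ (f : Int) ≤ n then
    (f : Int) :: altPlaces n (f * (j + 2)) (j + 1)
  else []
termination_by (n + 1).toNat - f
decreasing_by
  have h1 : f * 2 ≤ f * (j + 2) := Nat.mul_le_mul_left _ (by omega)
  have h2 : f < (n + 1).toNat := by omega
  omega

-- B's second loop: emit str(n // p), n %= p over the places from the top down.
def altDigits (n : Int) (ps : List Int) : List String :=
  match ps with
  | [] => []
  | p :: rest =>
      PySem.Int.toStr (PySem.Int.floordiv n p) :: altDigits (PySem.Int.mod n p) rest

def to_factorial_base_alt (n : Int) : String :=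
  if n == 0 then "0" else PySem.Str.join "" (altDigits n (altPlaces n 1 0).reverse)

-- ===== PRECONDITION & SPEC =====
def Spec_to_factorial_base (n : Int) (out : String) : Prop := out = to_factorial_base_alt n
instance (n : Int) (out : String) : Decidable (Spec_to_factorial_base n out) := by unfold Spec_to_factorial_base; infer_instance

-- ===== CLAIM (what is proved, stated in full; the proofs are below) =====
def Claim_equal_to_factorial_base : Prop := ∀ (n : Int), Dom_to_factorial_base n → Spec_to_factorial_base n (to_factorial_base n)

-- ===== LEMMAS AND PROOFS =====

-- remainder left over after B's second loop has consumed the places ps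
def remAfter (n : Int) (ps : List Int) : Int :=
  ps.foldl (fun m p => PySem.Int.mod m p) n

theorem altPlaces_pos (n : Int) (f j : Nat) : ∀ p ∈ altPlaces n f j, 0 < p := by
  rw [altPlaces]
  by_cases h : 0 < f ∧ (f : Int) ≤ n
  · rw [dif_pos h]
    intro p hp
    rcases List.mem_cons.mp hp with h1 | h2
    · subst h1; exact_mod_cast h.1
    · exact altPlaces_pos n (f * (j + 2)) (j + 1) p h2
  · rw [dif_neg h]; intro p hp; cases hp
termination_by (n + 1).toNat - f
decreasing_by
  have h1 : f * 2 ≤ f * (j + 2) := Nat.mul_le_mul_left _ (by omega)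
  have h2 : f < (n + 1).toNat := by omega
  omega

theorem altPlaces_scale (n : Int) (c : Nat) (hc : 0 < c) (f j : Nat) :
    altPlaces n (f * c) j = (altPlaces (n / (c : Int)) f j).map (· * (c : Int)) := by
  have hcI : (0 : Int) < (c : Int) := by exact_mod_cast hc
  conv_lhs => rw [altPlaces]
  conv_rhs => rw [altPlaces]
  by_cases h : 0 < f ∧ (f : Int) ≤ n / (c : Int)
  · have hfc : 0 < f * c ∧ ((f * c : Nat) : Int) ≤ n := by
      refine ⟨Nat.mul_pos h.1 hc, ?_⟩
      have := (Int.le_ediv_iff_mul_le hcI).mp h.2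
      push_cast
      exact this
    rw [dif_pos hfc, dif_pos h, List.map_cons]
    refine congrArg₂ _ (by push_cast; ring) ?_
    have harg : f * c * (j + 2) = f * (j + 2) * c := by ring
    rw [harg]
    exact altPlaces_scale n c hc (f * (j + 2)) (j + 1)
  · have hfc : ¬ (0 < f * c ∧ ((f * c : Nat) : Int) ≤ n) := by
      intro hcontra
      apply h
      have hf : 0 < f := by
        rcases Nat.eq_zero_or_pos f with h0 | h0
        · subst h0; simp at hcontra
        · exact h0
      refine ⟨hf, (Int.le_ediv_iff_mul_le hcI).mpr ?_⟩
      have := hcontra.2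
      push_cast at this
      exact this
    rw [dif_neg hfc, dif_neg h, List.map_nil]
termination_by (n / (c : Int) + 1).toNat - f
decreasing_by
  have h1 : f * 2 ≤ f * (j + 2) := Nat.mul_le_mul_left _ (by omega)
  have h2 : f < (n / (c : Int) + 1).toNat := by omega
  omega

theorem altDigits_append (n : Int) (ps qs : List Int) :
    altDigits n (ps ++ qs) = altDigits n ps ++ altDigits (remAfter n ps) qs := by
  induction ps generalizing n with
  | nil => simp [altDigits, remAfter]
  | cons p rest ih => simp [altDigits, remAfter, List.foldl_cons] at ih ⊢; exact ih _

theorem remAfter_append_one (n : Int) (ps : List Int) :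
    remAfter n (ps ++ [1]) = 0 := by
  simp [remAfter, List.foldl_append, List.foldl_cons]

theorem altDigits_scale (c : Int) (hc : 0 < c) :
    ∀ (rs : List Int), (∀ p ∈ rs, 0 < p) → ∀ (q r : Int), 0 ≤ q → 0 ≤ r → r < c →
      altDigits (q * c + r) (rs.map (· * c)) = altDigits q rs ∧
      remAfter (q * c + r) (rs.map (· * c)) = (remAfter q rs) * c + r := by
  intro rs
  induction rs with
  | nil => intro _ q r _ _ _; simp [altDigits, remAfter]
  | cons p rest ih =>
    intro hpos q r hq hr hrc
    have hp : 0 < p := hpos p (List.mem_cons_self ..)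
    have hpc : 0 < p * c := mul_pos hp hc
    have hqp0 : 0 ≤ q % p := Int.emod_nonneg q (ne_of_gt hp)
    have hqpp : q % p < p := Int.emod_lt_of_pos q hp
    have hqe := Int.ediv_add_emod q p
    have hkey : (q * c + r) / (p * c) = q / p ∧ (q * c + r) % (p * c) = (q % p) * c + r := by
      apply (Int.ediv_emod_unique hpc).mpr
      refine ⟨by linear_combination c * hqe, by positivity, by nlinarith⟩
    obtain ⟨hd, hm⟩ := hkey
    have ihh := ih (fun p hp => hpos p (List.mem_cons_of_mem _ hp)) (q % p) r hqp0 hr hrc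
    constructor
    · simp only [List.map_cons, altDigits,
        PySem.Int.floordiv_eq_ediv_of_pos hpc, PySem.Int.floordiv_eq_ediv_of_pos hp,
        PySem.Int.mod_eq_emod_of_pos hpc, PySem.Int.mod_eq_emod_of_pos hp,
        hd, hm]
      exact congrArg (List.cons _) ihh.1
    · simp only [List.map_cons, remAfter, List.foldl_cons,
        PySem.Int.mod_eq_emod_of_pos hpc, PySem.Int.mod_eq_emod_of_pos hp, hm]
      exact ihh.2

theorem main_lemma : ∀ (N : Nat) (n : Int) (j : Nat), n.toNat ≤ N →
    (toFactAux n j).reverse = altDigits n (altPlaces n 1 j).reverse := by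
  intro N
  induction N with
  | zero =>
    intro n j hN
    have hn : ¬ 0 < n := by omega
    rw [toFactAux, dif_neg hn, altPlaces,
      dif_neg (by push_neg; intro _; omega)]
    simp [altDigits]
  | succ N ihN =>
    intro n j hN
    by_cases hn : 0 < n
    case neg =>
      rw [toFactAux, dif_neg hn, altPlaces, dif_neg (by push_neg; intro _; omega)]
      simp [altDigits]
    case pos =>
    have hcI : (0 : Int) < (j : Int) + 2 := by positivity
    have hdm := Int.ediv_add_emod n ((j : Int) + 2)
    have hm0 : 0 ≤ n % ((j : Int) + 2) := Int.emod_nonneg n (ne_of_gt hcI)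
    have hmlt : n % ((j : Int) + 2) < (j : Int) + 2 := Int.emod_lt_of_pos n hcI
    rw [toFactAux, dif_pos hn, List.reverse_cons,
      PySem.Int.floordiv_eq_ediv_of_pos hcI, PySem.Int.mod_eq_emod_of_pos hcI]
    set q : Int := n / ((j : Int) + 2) with hqdef
    by_cases hq : 0 < q
    case neg =>
      -- n < j + 2 : a single digit on both sides
      have hq0 : 0 ≤ q := Int.ediv_nonneg (le_of_lt hn) (le_of_lt hcI)
      have hqz : q = 0 := by omega
      have hnlt : n < (j : Int) + 2 := by
        rw [hqz, mul_zero, zero_add] at hdm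
        omega
      rw [toFactAux, dif_neg hq, altPlaces, dif_pos ⟨Nat.one_pos, by omega⟩,
        altPlaces, dif_neg (by push_neg; intro _; push_cast; omega)]
      simp [altDigits, Int.emod_eq_of_lt (by omega) hnlt]
    case pos =>
    have hqlt : q < n := by
      rw [hqdef, Int.ediv_lt_iff_lt_mul hcI]; nlinarith
    have hqN : q.toNat ≤ N := by
      have h1 : q.toNat < n.toNat := by
        clear_value q
        omega
      omega
    have hIH := ihN q (j + 1) hqN
    have hcast : ((j + 2 : Nat) : Int) = (j : Int) + 2 := by push_cast; ring
    -- the place list of n is 1 followed by the place list of q scaled by j+2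
    have hplaces : altPlaces n 1 j
        = 1 :: (altPlaces q 1 (j + 1)).map (· * ((j : Int) + 2)) := by
      conv_lhs => rw [altPlaces]
      rw [dif_pos ⟨Nat.one_pos, by omega⟩,
        altPlaces_scale n (j + 2) (by omega) 1 (j + 1)]
      rw [hcast, ← hqdef]
      norm_num
    have hpos : ∀ p ∈ (altPlaces q 1 (j + 1)).reverse, 0 < p := by
      intro p hp
      exact altPlaces_pos q 1 (j + 1) p (List.mem_reverse.mp hp)
    have hneq : q * ((j : Int) + 2) + n % ((j : Int) + 2) = n := by
      linear_combination hdm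
    obtain ⟨hds, hrs⟩ := altDigits_scale ((j : Int) + 2) hcI
      ((altPlaces q 1 (j + 1)).reverse) hpos q (n % ((j : Int) + 2))
      (le_of_lt hq) hm0 hmlt
    -- the place list of q starts with the place value 1
    have hqtail : altPlaces q 1 (j + 1)
        = 1 :: altPlaces q (1 * (j + 1 + 2)) (j + 2) := by
      conv_lhs => rw [altPlaces]
      rw [dif_pos ⟨Nat.one_pos, by omega⟩]
      norm_num
    have hrem0 : remAfter q ((altPlaces q 1 (j + 1)).reverse) = 0 := by
      rw [hqtail, List.reverse_cons]
      exact remAfter_append_one q _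
    rw [hplaces, List.reverse_cons, ← List.map_reverse, altDigits_append]
    have e1 : altDigits n (((altPlaces q 1 (j + 1)).reverse).map (· * ((j : Int) + 2)))
        = altDigits q ((altPlaces q 1 (j + 1)).reverse) := by
      conv_lhs => rw [← hneq]
      exact hds
    have e2 : remAfter n (((altPlaces q 1 (j + 1)).reverse).map (· * ((j : Int) + 2)))
        = n % ((j : Int) + 2) := by
      conv_lhs => rw [← hneq]
      rw [hrs, hrem0]
      ring
    rw [e1, e2, ← hIH]
    simp [altDigits]

-- ===== VERDICT (by name: the statement is the Claim_ definition above) =====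
theorem to_factorial_base_spec : Claim_equal_to_factorial_base := by
  intro n _
  unfold Spec_to_factorial_base to_factorial_base to_factorial_base_alt
  split_ifs with h
  · rfl
  · rw [main_lemma n.toNat n 0 le_rfl]
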